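-- pv_equiv track=rewrite | github.com/Khlopotnoy-Romadov/beneficial_shop | best_product.py | list_of_purchases
-- ===== SOURCE A (Python) =====
-- def list_of_purchases(lst: list, shops: dict)->dict:
--     values = dict()
--     for i in lst:
--         for j in shops.keys():
--             if j in values.keys():
--                 values[j] += shops[j][i]
--             else:
--                 values[j] = shops[j][i]
--     return values
-- ===== SOURCE B (Python) =====
-- def list_of_purchases(lst: list, shops: dict) -> dict:
--     # Count each item's multiplicity once, then take a weighted sum over the
--     # DISTINCT items per shop, instead of re-adding every occurrence per shop.
--     counts = {}
--     for i in lst: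
--         counts[i] = counts.get(i, 0) + 1
--     totals = {}
--     if counts:
--         for j, prices in shops.items():
--             totals[j] = sum(prices[i] * c for i, c in counts.items())
--     return totals
-- ===== Notes on version B (the rewrite author's own statement) =====
-- stated objective: alternative
-- what changed: B first builds a multiplicity counter over lst in one pass, then computes each shop's total as a weighted sum price*count over the distinct items, instead of A's item-major pass that re-adds every occurrence into every shop's running total with a membership branch.
import Mathlib
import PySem

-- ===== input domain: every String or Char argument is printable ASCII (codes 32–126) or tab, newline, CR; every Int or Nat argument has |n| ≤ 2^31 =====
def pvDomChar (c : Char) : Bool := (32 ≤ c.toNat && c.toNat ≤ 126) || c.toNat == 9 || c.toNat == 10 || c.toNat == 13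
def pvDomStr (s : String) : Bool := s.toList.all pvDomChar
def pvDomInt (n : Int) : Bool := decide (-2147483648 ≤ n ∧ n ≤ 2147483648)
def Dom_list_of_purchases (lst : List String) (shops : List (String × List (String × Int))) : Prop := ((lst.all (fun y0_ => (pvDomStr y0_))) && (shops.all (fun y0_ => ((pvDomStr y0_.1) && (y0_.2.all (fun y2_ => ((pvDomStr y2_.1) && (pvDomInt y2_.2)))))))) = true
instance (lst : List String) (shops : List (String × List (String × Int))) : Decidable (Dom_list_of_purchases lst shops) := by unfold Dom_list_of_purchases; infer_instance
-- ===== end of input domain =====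

-- B replaces A's item-major accumulation (one addition per item occurrence per shop,
-- with a membership branch) by a two-stage algorithm: one counting pass over lst,
-- then per shop a weighted sum price*count over the DISTINCT items.  Objective: alternative.

-- ===== PORT A =====
-- literal transliteration of A: values = {}; for i in lst: for j in shops.keys():
--   if j in values: values[j] += shops[j][i] else: values[j] = shops[j][i]
def list_of_purchases (lst : List String) (shops : List (String × List (String × Int))) : List (String × Int) :=
  let sd : PySem.Dict String (List (String × Int)) := PySem.Dict.ofList shops
  (lst.foldl (fun values i =>
      sd.keys.foldl (fun v j =>
        let p : Int := (PySem.Dict.ofList (sd.getD j [])).getD i 0   -- shops[j][i]; KeyError (excluded by Pre_) modelled by default 0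
        if v.contains j then v.insert j (v.getD j 0 + p)
        else v.insert j p) values)
    PySem.Dict.empty).items

-- ===== PORT B =====
-- transliteration of Source B: counts = {}; for i in lst: counts[i] = counts.get(i,0)+1;
-- totals = {}; if counts: for j, prices in shops.items(): totals[j] = sum(prices[i]*c …)
def list_of_purchases_alt (lst : List String) (shops : List (String × List (String × Int))) : List (String × Int) :=
  let counts : PySem.Dict String Int :=
    lst.foldl (fun c i => c.insert i (c.getD i 0 + 1)) PySem.Dict.empty
  let totals : PySem.Dict String Int :=
    if counts.items = [] then PySem.Dict.empty
    else (PySem.Dict.ofList shops).items.foldl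
      (fun t q =>
        t.insert q.1 ((counts.items.map
          (fun p => (PySem.Dict.ofList q.2).getD p.1 0 * p.2)).sum))  -- prices[i]*c; KeyError excluded by Pre_
      PySem.Dict.empty
  totals.items

-- ===== PRECONDITION & SPEC =====
-- Pre_ excludes exactly the inputs where Python A raises KeyError: some purchased
-- item is missing from some shop's price dict.
def Pre_list_of_purchases (lst : List String) (shops : List (String × List (String × Int))) : Prop :=
  ∀ q ∈ (PySem.Dict.ofList shops).items, ∀ i ∈ lst, (PySem.Dict.ofList q.2).contains i = true
instance (lst : List String) (shops : List (String × List (String × Int))) : Decidable (Pre_list_of_purchases lst shops) := by unfold Pre_list_of_purchases; infer_instance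

def pvWitness_list_of_purchases : List String × (List (String × List (String × Int))) :=
  (["a", "b"], [("x", [("a", 3), ("b", 4)]), ("y", [("a", 1), ("b", 2)])])

def Spec_list_of_purchases (lst : List String) (shops : List (String × List (String × Int))) (out : List (String × Int)) : Prop := out = list_of_purchases_alt lst shops
instance (lst : List String) (shops : List (String × List (String × Int))) (out : List (String × Int)) : Decidable (Spec_list_of_purchases lst shops out) := by unfold Spec_list_of_purchases; infer_instance

-- ===== CLAIM (what is proved, stated in full; the proofs are below) =====
def Claim_equal_list_of_purchases : Prop := ∀ (lst : List String) (shops : List (String × List (String × Int))), Dom_list_of_purchases lst shops → Pre_list_of_purchases lst shops → Spec_list_of_purchases lst shops (list_of_purchases lst shops)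

-- ===== LEMMAS AND PROOFS =====

-- ---- A-side characterisation ----

-- collapse A's membership branch: both arms are 'insert j (getD j 0 + p j)'
theorem pv_inner_collapse (K : List String) (p : String → Int) (v : PySem.Dict String Int) :
    K.foldl (fun v j => if v.contains j then v.insert j (v.getD j 0 + p j) else v.insert j (p j)) v
      = K.foldl (fun v j => v.insert j (v.getD j 0 + p j)) v := by
  induction K generalizing v with
  | nil => rfl
  | cons j K ih =>
    simp only [List.foldl_cons]
    by_cases h : v.contains j = true
    · rw [if_pos h, ih]
    · rw [if_neg h, PySem.Dict.getD_of_not_contains _ _ (by simpa using h), zero_add, ih]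

theorem pv_inner_getD (K : List String) (hK : K.Nodup) (p : String → Int)
    (v : PySem.Dict String Int) (x : String) :
    (K.foldl (fun v j => v.insert j (v.getD j 0 + p j)) v).getD x 0
      = v.getD x 0 + (if x ∈ K then p x else 0) := by
  induction K generalizing v with
  | nil => simp
  | cons j K ih =>
    simp only [List.foldl_cons]
    rcases List.nodup_cons.mp hK with ⟨hj, hK'⟩
    rw [ih hK']
    by_cases hx : x = j
    · subst hx
      rw [PySem.Dict.getD_insert_self]
      simp [hj]
    · rw [PySem.Dict.getD_insert_of_ne _ _ _ hx]
      simp [hx]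

theorem pv_outer_getD (K : List String) (hK : K.Nodup) (price : String → String → Int)
    (L : List String) (v : PySem.Dict String Int) (x : String) :
    (L.foldl (fun v i => K.foldl (fun v j => v.insert j (v.getD j 0 + price j i)) v) v).getD x 0
      = v.getD x 0 + (if x ∈ K then (L.map (fun i => price x i)).sum else 0) := by
  induction L generalizing v with
  | nil => simp
  | cons i L ih =>
    simp only [List.foldl_cons]
    rw [ih, pv_inner_getD K hK _ v x]
    split_ifs with h
    · simp only [List.map_cons, List.sum_cons]; ring
    · simp

theorem pv_inner_keys_stable (K : List String) (p : String → Int)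
    (v : PySem.Dict String Int) (hsub : ∀ j ∈ K, j ∈ v.keys) :
    (K.foldl (fun v j => v.insert j (v.getD j 0 + p j)) v).keys = v.keys := by
  rw [PySem.Dict.keys_foldl_insert, PySem.Set.update_eq_append_filter]
  have hnil : List.filter (fun y => !(PySem.Set.contains v.keys y)) (PySem.Set.ofList K) = [] := by
    apply List.filter_eq_nil_iff.mpr
    intro y hy
    have hmem : y ∈ v.keys := hsub y ((PySem.Set.mem_ofList K y).mp hy)
    simp [hmem]
  rw [hnil, List.append_nil]

theorem pv_outer_keys (K : List String) (price : String → String → Int)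
    (L : List String) (v : PySem.Dict String Int) (hsub : ∀ j ∈ K, j ∈ v.keys) :
    (L.foldl (fun v i => K.foldl (fun v j => v.insert j (v.getD j 0 + price j i)) v) v).keys = v.keys := by
  induction L generalizing v with
  | nil => rfl
  | cons i L ih =>
    simp only [List.foldl_cons]
    rw [ih, pv_inner_keys_stable K _ v hsub]
    intro j hj
    rw [pv_inner_keys_stable K _ v hsub]; exact hsub j hj

-- the item-major accumulation from the empty dict, on a nonempty item list,
-- produces exactly one total per key, in key order
theorem pv_master (K : List String) (hK : K.Nodup) (price : String → String → Int)
    (i0 : String) (L : List String) :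
    ((i0 :: L).foldl (fun values i => K.foldl (fun v j => v.insert j (v.getD j 0 + price j i)) values)
        (PySem.Dict.empty : PySem.Dict String Int)).items
      = K.map (fun x => (x, ((i0 :: L).map (fun i => price x i)).sum)) := by
  have hkeys1 : ((K.foldl (fun v j => v.insert j (v.getD j 0 + price j i0))
      (PySem.Dict.empty : PySem.Dict String Int)).keys) = K := by
    rw [PySem.Dict.keys_foldl_insert]
    have he : (PySem.Dict.empty : PySem.Dict String Int).keys = [] := rfl
    rw [he, PySem.Set.update_nil_left, PySem.Set.ofList_eq_self_of_nodup K hK]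
  have hkeys : (((i0 :: L)).foldl (fun values i => K.foldl (fun v j => v.insert j (v.getD j 0 + price j i)) values)
      (PySem.Dict.empty : PySem.Dict String Int)).keys = K := by
    simp only [List.foldl_cons]
    rw [pv_outer_keys K price L _ (by intro j hj; rw [hkeys1]; exact hj)]
    exact hkeys1
  have hnodup : (((i0 :: L)).foldl (fun values i => K.foldl (fun v j => v.insert j (v.getD j 0 + price j i)) values)
      (PySem.Dict.empty : PySem.Dict String Int)).keys.Nodup := by
    rw [hkeys]; exact hK
  rw [PySem.Dict.items_eq_map_keys _ hnodup 0, hkeys]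
  apply List.map_congr_left
  intro x hx
  rw [pv_outer_getD K hK price (i0 :: L) PySem.Dict.empty x, if_pos hx]
  have he : (PySem.Dict.empty : PySem.Dict String Int).getD x 0 = 0 := rfl
  rw [he, zero_add]

-- ---- B-side: weighted sums over the counter equal plain sums over lst ----

theorem pv_sum_ite (f : String → Int) (K : List String) (hK : K.Nodup) (i : String) (hi : i ∈ K) :
    (K.map (fun k => if k = i then f k else 0)).sum = f i := by
  induction K with
  | nil => cases hi
  | cons a K ih =>
    rcases List.nodup_cons.mp hK with ⟨ha, hK'⟩
    rw [List.map_cons, List.sum_cons]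
    by_cases h : a = i
    · subst h
      rw [if_pos rfl]
      have hz : (K.map (fun k => if k = a then f k else 0)) = K.map (fun _ => (0 : Int)) := by
        apply List.map_congr_left; intro x hx; exact if_neg (by rintro rfl; exact ha hx)
      rw [hz]; simp
    · have hiK : i ∈ K := by
        rcases List.mem_cons.mp hi with e | e
        · exact absurd e.symm h
        · exact e
      rw [if_neg h, ih hK' hiK, zero_add]

theorem pv_weighted_sum (f : String → Int) (K : List String) (hK : K.Nodup)
    (l : List String) (hmem : ∀ i ∈ l, i ∈ K) :
    (K.map (fun k => f k * (l.count k : Int))).sum = (l.map f).sum := by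
  induction l with
  | nil => simp
  | cons i l ih =>
    have hmem' : ∀ x ∈ l, x ∈ K := fun x hx => hmem x (List.mem_cons_of_mem _ hx)
    have hsplit : K.map (fun k => f k * (((i :: l).count k : Nat) : Int))
        = K.map (fun k => f k * (l.count k : Int) + (if k = i then f k else 0)) := by
      apply List.map_congr_left; intro k _
      have hc : (i :: l).count k = l.count k + (if k = i then 1 else 0) := by
        rw [List.count_cons]
        by_cases h : k = i
        · simp [h]
        · simp [h]
          exact fun e => h e.symm
      rw [hc]; push_cast
      by_cases h : k = i
      · simp [h]; ring
      · simp [h]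
    rw [hsplit, PySem.List.sum_map_add_int, ih hmem',
        pv_sum_ite f K hK i (hmem i (List.mem_cons_self ..))]
    simp [List.map_cons]; ring

-- ===== VERDICT (by name: the statement is the Claim_ definition above) =====
theorem list_of_purchases_spec : Claim_equal_list_of_purchases := by
  intro lst shops _ _
  unfold Spec_list_of_purchases list_of_purchases list_of_purchases_alt
  simp only []
  have hcnt : lst.foldl (fun c i => c.insert i (c.getD i 0 + 1))
      (PySem.Dict.empty : PySem.Dict String Int) = PySem.Dict.counter lst :=
    PySem.Dict.foldl_insert_getD_add_one_eq_counter lst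
  cases lst with
  | nil => rfl
  | cons i0 L =>
    rw [hcnt]
    -- the guard is false: the counter of a nonempty list has nonempty items
    have hitems : (PySem.Dict.counter (i0 :: L)).items
        = (PySem.Set.ofList (i0 :: L)).map (fun k => (k, ((i0 :: L).count k : Int))) :=
      PySem.Dict.items_counter (i0 :: L)
    have hne : (PySem.Dict.counter (i0 :: L)).items ≠ [] := by
      rw [hitems, PySem.Set.ofList_cons]; simp
    rw [if_neg hne]
    -- B's totals loop inserts each shop key exactly once, keys fresh and distinct
    have hfresh : ((PySem.Dict.ofList shops).items.foldl
        (fun (t : PySem.Dict String Int) q =>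
          t.insert q.1 (((PySem.Dict.counter (i0 :: L)).items.map
            (fun p => (PySem.Dict.ofList q.2).getD p.1 0 * p.2)).sum))
        PySem.Dict.empty).items
        = (PySem.Dict.ofList shops).items.map
            (fun q => (q.1, ((PySem.Dict.counter (i0 :: L)).items.map
              (fun p => (PySem.Dict.ofList q.2).getD p.1 0 * p.2)).sum)) := by
      have h := PySem.Dict.items_foldl_insert_fresh
        (l := (PySem.Dict.ofList shops).items) (k := fun q => q.1)
        (v := fun q => (((PySem.Dict.counter (i0 :: L)).items.map
            (fun p => (PySem.Dict.ofList q.2).getD p.1 0 * p.2)).sum))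
        (d := (PySem.Dict.empty : PySem.Dict String Int))
        (by intro a _; rfl)
        (by
          have : (PySem.Dict.ofList shops).items.map (fun q => q.1)
              = (PySem.Dict.ofList shops).keys := rfl
          rw [this]; exact PySem.Dict.nodup_keys_ofList shops)
      simpa using h
    rw [hfresh]
    -- A's side: collapse the branch, then the master characterisation
    have hstep : (fun (values : PySem.Dict String Int) (i : String) =>
        (PySem.Dict.ofList shops).keys.foldl (fun v j =>
          if v.contains j then
            v.insert j (v.getD j 0 + (PySem.Dict.ofList ((PySem.Dict.ofList shops).getD j [])).getD i 0)
          else v.insert j ((PySem.Dict.ofList ((PySem.Dict.ofList shops).getD j [])).getD i 0)) values)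
      = (fun (values : PySem.Dict String Int) (i : String) =>
        (PySem.Dict.ofList shops).keys.foldl (fun v j =>
          v.insert j (v.getD j 0 + (PySem.Dict.ofList ((PySem.Dict.ofList shops).getD j [])).getD i 0)) values) := by
      funext values i
      exact pv_inner_collapse (PySem.Dict.ofList shops).keys
        (fun j => (PySem.Dict.ofList ((PySem.Dict.ofList shops).getD j [])).getD i 0) values
    rw [hstep,
      pv_master (PySem.Dict.ofList shops).keys (PySem.Dict.nodup_keys_ofList shops)
        (fun j i => (PySem.Dict.ofList ((PySem.Dict.ofList shops).getD j [])).getD i 0) i0 L,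
      PySem.Dict.items_eq_map_keys (PySem.Dict.ofList shops) (PySem.Dict.nodup_keys_ofList shops) [],
      List.map_map]
    apply List.map_congr_left
    intro x hx
    simp only [Function.comp]
    refine Prod.ext rfl ?_
    -- per key: plain sum over lst = weighted sum over the counter's items
    rw [hitems, List.map_map]
    exact (pv_weighted_sum
      (fun i => (PySem.Dict.ofList ((PySem.Dict.ofList shops).getD x [])).getD i 0)
      (PySem.Set.ofList (i0 :: L)) (PySem.Set.nodup_ofList _)
      (i0 :: L) (fun i hi => (PySem.Set.mem_ofList _ _).mpr hi)).symm
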